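-- pv_equiv track=rewrite | github.com/E-W-Jones/AoC2023 | Day 14/day14.py | calculate_runs_west_east
-- ===== SOURCE A (Python) =====
-- def calculate_runs_west_east(grid):
--     runs = []
--     run = []
--     for i in range(len(grid)):
--         run = []
--         for j in range(len(grid[0])):
--             if grid[i][j] == "#":
--                 if run:
--                     runs.append(run)
--                 run = []
--             else:
--                 run.append((i, j))
--         else:
--             if run:
--                 runs.append(run)
--                 run = []
--     return runs
-- ===== SOURCE B (Python) =====
-- def calculate_runs_west_east(grid):
--     # Two-pointer segment scan: find each maximal non-'#' stretch and emit it whole,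
--     # instead of growing/flushing a run cell by cell.
--     runs = []
--     for i, row in enumerate(grid):
--         n = len(grid[0])
--         j = 0
--         while j < n:
--             if row[j] == "#":
--                 j += 1
--             else:
--                 k = j
--                 while k < n and row[k] != "#":
--                     k += 1
--                 runs.append([(i, c) for c in range(j, k)])
--                 j = k
--     return runs
-- ===== Notes on version B (the rewrite author's own statement) =====
-- stated objective: alternative
-- what changed: A grows a pending run cell by cell and flushes it at each wall and at the row end; B two-pointer-scans each row for the next wall and emits every maximal non-'#' segment whole via a range comprehension.
import Mathlib
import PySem

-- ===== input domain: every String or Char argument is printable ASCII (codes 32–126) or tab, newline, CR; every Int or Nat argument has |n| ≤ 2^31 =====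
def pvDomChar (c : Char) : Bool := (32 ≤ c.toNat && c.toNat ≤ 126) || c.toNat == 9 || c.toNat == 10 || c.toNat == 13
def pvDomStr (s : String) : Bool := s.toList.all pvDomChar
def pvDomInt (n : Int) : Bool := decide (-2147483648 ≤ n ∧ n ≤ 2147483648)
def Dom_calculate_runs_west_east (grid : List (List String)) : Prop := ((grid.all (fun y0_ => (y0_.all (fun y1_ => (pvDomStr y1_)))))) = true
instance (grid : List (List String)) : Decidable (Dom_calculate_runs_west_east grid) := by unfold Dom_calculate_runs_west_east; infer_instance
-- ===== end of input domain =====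

-- B replaces A's cell-by-cell run accumulator with a two-pointer scan that emits each
-- maximal non-'#' segment whole (objective: alternative; same asymptotic cost).

-- ===== PORT A =====
-- A: for each row index i, fold over j in range(len(grid[0])) carrying (runs, run),
-- flushing the pending run at each wall and after the row.
def calculate_runs_west_east (grid : List (List String)) : List (List (Int × Int)) :=
  (PySem.List.pyRange 0 grid.length 1).foldl (fun runs i =>
    let row := PySem.List.pyGetD grid i []
    let p := (PySem.List.pyRange 0 ((grid.headD []).length : Int) 1).foldl
      (fun (p : List (List (Int × Int)) × List (Int × Int)) j =>
        if PySem.List.pyGetD row j "" = "#" then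
          ((if p.2 ≠ [] then p.1 ++ [p.2] else p.1), [])
        else (p.1, p.2 ++ [(i, j)])) (runs, [])
    if p.2 ≠ [] then p.1 ++ [p.2] else p.1) []

-- ===== PORT B =====
-- inner `while k < n and row[k] != '#': k += 1`
def pvScanB (row : List String) (n : Nat) (k : Nat) : Nat :=
  if k < n then
    if PySem.List.pyGetD row (k : Int) "" ≠ "#" then pvScanB row n (k + 1) else k
  else k
termination_by n - k

lemma pvScanB_ge (row : List String) (n k : Nat) : k ≤ pvScanB row n k := by
  fun_induction pvScanB row n k with
  | case1 k h hw ih => omega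
  | case2 k h hw => omega
  | case3 k h => omega

-- outer `while j < n` loop of one row
def pvRowB (i : Int) (row : List String) (n : Nat) (j : Nat)
    (runs : List (List (Int × Int))) : List (List (Int × Int)) :=
  if hj : j < n then
    if hw : PySem.List.pyGetD row (j : Int) "" = "#" then pvRowB i row n (j + 1) runs
    else
      pvRowB i row n (pvScanB row n j)
        (runs ++ [((PySem.List.pyRange (j : Int) (pvScanB row n j) 1).map (fun c => (i, c)))])
  else runs
termination_by n - j
decreasing_by
  · omega
  · have h1 : j + 1 ≤ pvScanB row n (j + 1) := pvScanB_ge row n (j + 1)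
    have h2 : pvScanB row n j = pvScanB row n (j + 1) := by
      conv_lhs => rw [pvScanB]
      rw [if_pos hj, if_pos hw]
    omega

def calculate_runs_west_east_alt (grid : List (List String)) : List (List (Int × Int)) :=
  (PySem.List.enumerate grid 0).foldl
    (fun runs p => pvRowB p.1 p.2 (grid.headD []).length 0 runs) []

-- ===== PRECONDITION & SPEC =====
-- Pre_: every row is at least as long as the first row; on shorter rows Python A
-- raises IndexError at grid[i][j] (and B raises the same way).
def Pre_calculate_runs_west_east (grid : List (List String)) : Prop :=
  ∀ row ∈ grid, (grid.headD []).length ≤ row.length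
instance (grid : List (List String)) : Decidable (Pre_calculate_runs_west_east grid) := by
  unfold Pre_calculate_runs_west_east; infer_instance
def pvWitness_calculate_runs_west_east : List (List String) :=
  [[".", "#", "."], ["#", ".", "."]]

def Spec_calculate_runs_west_east (grid : List (List String)) (out : List (List (Int × Int))) : Prop := out = calculate_runs_west_east_alt grid
instance (grid : List (List String)) (out : List (List (Int × Int))) : Decidable (Spec_calculate_runs_west_east grid out) := by unfold Spec_calculate_runs_west_east; infer_instance

-- ===== CLAIM (what is proved, stated in full; the proofs are below) =====
def Claim_equal_calculate_runs_west_east : Prop := ∀ (grid : List (List String)), Dom_calculate_runs_west_east grid → Pre_calculate_runs_west_east grid → Spec_calculate_runs_west_east grid (calculate_runs_west_east grid)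

-- ===== LEMMAS AND PROOFS =====

-- flush a pending run
def pvFlush (pend : List (Int × Int)) : List (List (Int × Int)) :=
  if pend ≠ [] then [pend] else []

-- common reference semantics of one row, indices j..n, pending run `pend`
def pvAux (i : Int) (g : Int → String) (j n : Int) (pend : List (Int × Int)) :
    List (List (Int × Int)) :=
  if j < n then
    if g j = "#" then pvFlush pend ++ pvAux i g (j + 1) n []
    else pvAux i g (j + 1) n (pend ++ [(i, j)])
  else pvFlush pend
termination_by (n - j).toNat
decreasing_by all_goals omega


-- pair flush (the `else:` clause of A's inner for-loop)
def pvFlushP (p : List (List (Int × Int)) × List (Int × Int)) : List (List (Int × Int)) :=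
  if p.2 ≠ [] then p.1 ++ [p.2] else p.1

-- A's inner-loop step function
def pvStepA (i : Int) (g : Int → String) (p : List (List (Int × Int)) × List (Int × Int))
    (k : Int) : List (List (Int × Int)) × List (Int × Int) :=
  if g k = "#" then ((if p.2 ≠ [] then p.1 ++ [p.2] else p.1), []) else (p.1, p.2 ++ [(i, k)])

lemma pvLemA (i : Int) (g : Int → String) :
    ∀ (m : Nat) (j n : Int), (n - j).toNat = m →
    ∀ (runs : List (List (Int × Int))) (pend : List (Int × Int)),
    pvFlushP ((PySem.List.pyRange j n 1).foldl (pvStepA i g) (runs, pend)) =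
      runs ++ pvAux i g j n pend := by
  intro m
  induction m with
  | zero =>
    intro j n hm runs pend
    rw [PySem.List.pyRange_one_eq_nil (by omega), List.foldl_nil, pvAux]
    rw [if_neg (by omega : ¬ j < n)]
    unfold pvFlushP pvFlush
    by_cases hp : pend = [] <;> simp [hp]
  | succ m ih =>
    intro j n hm runs pend
    have hj : j < n := by omega
    rw [PySem.List.pyRange_one_cons hj, List.foldl_cons, pvAux, if_pos hj]
    by_cases hw : g j = "#"
    · rw [if_pos hw]
      have hstep : pvStepA i g (runs, pend) j = (runs ++ pvFlush pend, []) := by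
        unfold pvStepA pvFlush
        rw [if_pos hw]
        split <;> simp
      rw [hstep, ih (j + 1) n (by omega), List.append_assoc]
    · rw [if_neg hw]
      have hstep : pvStepA i g (runs, pend) j = (runs, pend ++ [(i, j)]) := by
        unfold pvStepA; rw [if_neg hw]
      rw [hstep, ih (j + 1) n (by omega)]

lemma pvSeg (i : Int) (g : Int → String) :
    ∀ (d : Nat) (j k n : Int), (k - j).toNat = d → j ≤ k → k ≤ n →
    (∀ t : Int, j ≤ t → t < k → g t ≠ "#") →
    ∀ pend, pvAux i g j n pend =
      pvAux i g k n (pend ++ (PySem.List.pyRange j k 1).map (fun c => (i, c))) := by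
  intro d
  induction d with
  | zero =>
    intro j k n hd hjk hkn hnw pend
    have : j = k := by omega
    subst this
    rw [PySem.List.pyRange_one_eq_nil (by omega)]
    simp
  | succ d ih =>
    intro j k n hd hjk hkn hnw pend
    have hj : j < k := by omega
    rw [pvAux, if_pos (by omega : j < n), if_neg (hnw j le_rfl hj)]
    rw [ih (j + 1) k n (by omega) (by omega) hkn (fun t ht1 ht2 => hnw t (by omega) ht2)]
    rw [PySem.List.pyRange_one_cons hj]
    simp

lemma pvScanB_le (row : List String) (n k : Nat) (h : k ≤ n) : pvScanB row n k ≤ n := by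
  fun_induction pvScanB row n k with
  | case1 k h1 h2 ih => exact ih (by omega)
  | case2 k h1 h2 => omega
  | case3 k h1 => omega

lemma pvScanB_nonwall (row : List String) (n k : Nat) :
    ∀ t : Nat, k ≤ t → t < pvScanB row n k → PySem.List.pyGetD row (t : Int) "" ≠ "#" := by
  fun_induction pvScanB row n k with
  | case1 k h1 h2 ih =>
    intro t ht1 ht2
    rcases Nat.eq_or_lt_of_le ht1 with rfl | hlt
    · exact h2
    · exact ih t hlt ht2
  | case2 k h1 h2 => intro t ht1 ht2; omega
  | case3 k h1 => intro t ht1 ht2; omega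

lemma pvScanB_stop (row : List String) (n k : Nat) (h : pvScanB row n k < n) :
    PySem.List.pyGetD row ((pvScanB row n k : Nat) : Int) "" = "#" := by
  fun_induction pvScanB row n k with
  | case1 k h1 h2 ih => exact ih h
  | case2 k h1 h2 => simpa using h2
  | case3 k h1 => omega

lemma pvLemB (i : Int) (row : List String) (n : Nat) :
    ∀ (m j : Nat), n - j ≤ m → ∀ (runs : List (List (Int × Int))),
    pvRowB i row n j runs =
      runs ++ pvAux i (fun t => PySem.List.pyGetD row t "") (j : Int) (n : Int) [] := by
  intro m
  induction m with
  | zero =>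
    intro j hm runs
    have hj : ¬ j < n := by omega
    rw [pvRowB, dif_neg hj, pvAux, if_neg (by exact_mod_cast hj)]
    simp [pvFlush]
  | succ m ih =>
    intro j hm runs
    by_cases hj : j < n
    · by_cases hw : PySem.List.pyGetD row (j : Int) "" = "#"
      · rw [pvRowB, dif_pos hj, dif_pos hw, ih (j + 1) (by omega) runs]
        have hcast : (((j + 1 : Nat)) : Int) = (j : Int) + 1 := by push_cast; ring
        rw [hcast]
        conv_rhs => rw [pvAux]
        rw [if_pos (show (j : Int) < (n : Int) by exact_mod_cast hj), if_pos hw]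
        simp [pvFlush]
      · obtain ⟨k, hk⟩ : ∃ k, pvScanB row n j = k := ⟨_, rfl⟩
        have hjk : j < k := by
          have h1 : j + 1 ≤ pvScanB row n (j + 1) := pvScanB_ge row n (j + 1)
          have h2 : pvScanB row n j = pvScanB row n (j + 1) := by
            conv_lhs => rw [pvScanB]
            rw [if_pos hj, if_pos hw]
          omega
        have hkn : k ≤ n := hk ▸ pvScanB_le row n j (by omega)
        rw [pvRowB, dif_pos hj, dif_neg hw, hk, ih k (by omega)]
        have hseg := pvSeg i (fun t => PySem.List.pyGetD row t "")
          ((k : Int) - (j : Int)).toNat (j : Int) (k : Int) (n : Int) rfl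
          (by exact_mod_cast Nat.le_of_lt hjk) (by exact_mod_cast hkn)
          (by
            intro t ht1 ht2
            have h0 : 0 ≤ t := by omega
            have htn : t = ((t.toNat : Nat) : Int) := by omega
            rw [htn]
            exact pvScanB_nonwall row n j t.toNat (by omega) (by omega)) []
        rw [hseg]
        set seg := (PySem.List.pyRange (j : Int) (k : Int) 1).map (fun c => ((i : Int), c)) with hsegdef
        have hne : seg ≠ [] := by
          have hlen : seg.length = ((k : Int) - (j : Int)).toNat := by
            rw [hsegdef, List.length_map, PySem.List.length_pyRange_one]
          intro hnil
          rw [hnil] at hlen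
          simp at hlen
          omega
        rw [List.nil_append]
        by_cases hkn2 : k < n
        · have hwall := pvScanB_stop row n j (by omega)
          rw [hk] at hwall
          conv_lhs => rw [pvAux]
          rw [if_pos (by exact_mod_cast hkn2), if_pos hwall]
          conv_rhs => rw [pvAux]
          rw [if_pos (by exact_mod_cast hkn2), if_pos hwall]
          simp [pvFlush, hne]
        · have hkeq : ¬ ((k : Int) < (n : Int)) := by exact_mod_cast hkn2
          conv_lhs => rw [pvAux]
          rw [if_neg hkeq]
          conv_rhs => rw [pvAux]
          rw [if_neg hkeq]
          simp [pvFlush, hne]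
    · rw [pvRowB, dif_neg hj, pvAux, if_neg (by exact_mod_cast hj)]
      simp [pvFlush]

lemma pvMain (grid : List (List String)) :
    calculate_runs_west_east grid = calculate_runs_west_east_alt grid := by
  unfold calculate_runs_west_east calculate_runs_west_east_alt
  rw [PySem.List.enumerate_eq_map_pyRange (xs := grid) ([] : List String), List.foldl_map]
  apply PySem.List.foldl_congr_mem
  intro runs x hx
  have hA : pvFlushP ((PySem.List.pyRange 0 ((grid.headD []).length : Int) 1).foldl
      (pvStepA x (fun t => PySem.List.pyGetD (PySem.List.pyGetD grid x []) t ""))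
      (runs, [])) =
      runs ++ pvAux x (fun t => PySem.List.pyGetD (PySem.List.pyGetD grid x []) t "")
        0 ((grid.headD []).length : Int) [] :=
    pvLemA x _ (((grid.headD []).length : Int) - 0).toNat 0 _ rfl runs []
  have hB := pvLemB x (PySem.List.pyGetD grid x []) (grid.headD []).length
    (grid.headD []).length 0 (by omega) runs
  rw [hB]
  simp only [Nat.cast_zero]
  rw [← hA]
  rfl


-- ===== VERDICT (by name: the statement is the Claim_ definition above) =====
theorem calculate_runs_west_east_spec : Claim_equal_calculate_runs_west_east := by
  intro grid _ _
  unfold Spec_calculate_runs_west_east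
  exact pvMain grid
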